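-- pv_equiv track=rewrite | github.com/ziavengers/ZIA | src/bind_generator/typelist.py | make_typelist
-- ===== SOURCE A (Python) =====
-- TYPELIST = (
--     'template <{typenames}>',
--     'struct TypeList{n} : private Storage{n}{templates}',
--     '{{',
--     'typedef Storage{n}{templates} BaseClass;',
--     'TypeList{n}({params}) : BaseClass({params_names}) {{}}',
--     'template <typename T>',
--     'T& operator[](Value<T>& v)',
--     '{{',
--     'return v.get();',
--     '}}',
--     'template <typename ReturnType, typename Caller, typename List>',
--     'ReturnType operator()(TypeTraits<ReturnType>, Caller& caller, List& list)',
--     '{{',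
--     'return caller({list_params});',
--     '}}',
--     '}};',
--
--     'template <{typenames}>',
--     'struct TypeListMember{n} : private Storage{n}{templates}',
--     '{{',
--     'typedef Storage{n}{templates} BaseClass;',
--     'TypeListMember{n}({params}) : BaseClass({params_names}) {{}}',
--     'template <typename T>',
--     'T& operator[](Value<T>& v)',
--     '{{',
--     'return v.get();',
--     '}}',
--     'template <typename ReturnType, typename Caller, typename List>',
--     'ReturnType operator()(TypeTraits<ReturnType>, Caller& caller, List& list)',
--     '{{',
--     'return (list[BaseClass::_t1].*caller)({list_params_next});',
--     '}}',
--     '}};',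
--     )
--
-- IGNORE_0 = tuple([0] + list(range(16, 32)))
--
-- def make_typelist(n):
--     if n < 0:
--         raise OverflowError
--     lines = make_typelist(n - 1) if n else []
--     kwargs = {
--         'n' : n,
--         'typenames' : ', '.join('typename P%d' % i for i in range(1, n + 1)),
--         'templates' : ('<' + ', '.join('P%d' % i for i in range(1, n + 1)) + '>') if n else '',
--         'params' : ', '.join('P%d p%d' % (i, i) for i in range(1, n + 1)),
--         'params_names' : ', '.join('p%d' % i for i in range(1, n + 1)),
--         'list_params' : ',\n'.join('list[BaseClass::_t%d]' % i for i in range(1, n + 1)),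
--         'list_params_next' : ',\n'.join('list[BaseClass::_t%d]' % i for i in range(2, n + 1))
--         }
--     for i, line in enumerate(TYPELIST):
--         if n or (not i in IGNORE_0):
--             lines.append(line.format(**kwargs))
--     return lines
-- ===== SOURCE B (Python) =====
-- def make_typelist(n):
--     if n < 0:
--         raise OverflowError
--     out = []
--     for i in range(n + 1):
--         si = str(i)
--         typenames = ', '.join('typename P%d' % j for j in range(1, i + 1))
--         templates = ('<' + ', '.join('P%d' % j for j in range(1, i + 1)) + '>') if i else ''
--         params = ', '.join('P%d p%d' % (j, j) for j in range(1, i + 1))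
--         params_names = ', '.join('p%d' % j for j in range(1, i + 1))
--         lp = ',\n'.join('list[BaseClass::_t%d]' % j for j in range(1, i + 1))
--         lpn = ',\n'.join('list[BaseClass::_t%d]' % j for j in range(2, i + 1))
--
--         def block(name, ret):
--             return [
--                 'template <%s>' % typenames,
--                 'struct %s%s : private Storage%s%s' % (name, si, si, templates),
--                 '{',
--                 'typedef Storage%s%s BaseClass;' % (si, templates),
--                 '%s%s(%s) : BaseClass(%s) {}' % (name, si, params, params_names),
--                 'template <typename T>',
--                 'T& operator[](Value<T>& v)',
--                 '{',
--                 'return v.get();',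
--                 '}',
--                 'template <typename ReturnType, typename Caller, typename List>',
--                 'ReturnType operator()(TypeTraits<ReturnType>, Caller& caller, List& list)',
--                 '{',
--                 ret,
--                 '}',
--                 '};',
--             ]
--
--         tl = block('TypeList', 'return caller(%s);' % lp)
--         if i == 0:
--             # level 0 keeps only the first struct, minus its empty template header
--             out.extend(tl[1:])
--         else:
--             out.extend(tl)
--             out.extend(block('TypeListMember',
--                              'return (list[BaseClass::_t1].*caller)(%s);' % lpn))
--     return out
-- ===== Notes on version B (the rewrite author's own statement) =====
-- stated objective: alternative
-- what changed: Replaces A's recursion plus str.format over the TYPELIST template tuple and the per-line enumerate/IGNORE_0 index filter by a forward loop over levels 0..n that builds each 16-line struct block directly by string concatenation, emitting only the trimmed TypeList block at level 0.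
import Mathlib
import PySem

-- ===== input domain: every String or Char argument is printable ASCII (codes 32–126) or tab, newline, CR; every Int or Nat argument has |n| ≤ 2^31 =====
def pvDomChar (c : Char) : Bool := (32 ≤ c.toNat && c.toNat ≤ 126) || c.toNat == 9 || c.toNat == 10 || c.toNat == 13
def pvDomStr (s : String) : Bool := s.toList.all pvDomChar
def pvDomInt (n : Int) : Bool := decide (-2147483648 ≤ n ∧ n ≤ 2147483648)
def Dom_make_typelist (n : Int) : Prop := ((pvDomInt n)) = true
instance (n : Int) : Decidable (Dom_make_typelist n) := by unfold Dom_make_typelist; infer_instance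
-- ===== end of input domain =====

-- B replaces A's recursion-plus-format-template design by a forward loop over levels 0..n that
-- builds each 16-line struct block directly by string concatenation (no TYPELIST templates,
-- no per-line IGNORE_0 index filter) (objective: alternative).

-- ===== PORT A =====
-- A's module constant TYPELIST: the format strings, parsed into literal/field tokens
-- (str.format on these fixed templates is ported by hand, exactly: '{{'/'}}' are the
-- literal braces, '{name}' is a field reference).
inductive TField
  | n | typenames | templates | params | params_names | list_params | list_params_next
deriving DecidableEq, Repr

inductive Tok
  | lit : String → Tok
  | f : TField → Tok
deriving DecidableEq, Repr

def TYPELIST : List (List Tok) := [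
  [.lit "template <", .f .typenames, .lit ">"],
  [.lit "struct TypeList", .f .n, .lit " : private Storage", .f .n, .f .templates],
  [.lit "{"],
  [.lit "typedef Storage", .f .n, .f .templates, .lit " BaseClass;"],
  [.lit "TypeList", .f .n, .lit "(", .f .params, .lit ") : BaseClass(", .f .params_names, .lit ") {}"],
  [.lit "template <typename T>"],
  [.lit "T& operator[](Value<T>& v)"],
  [.lit "{"],
  [.lit "return v.get();"],
  [.lit "}"],
  [.lit "template <typename ReturnType, typename Caller, typename List>"],
  [.lit "ReturnType operator()(TypeTraits<ReturnType>, Caller& caller, List& list)"],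
  [.lit "{"],
  [.lit "return caller(", .f .list_params, .lit ");"],
  [.lit "}"],
  [.lit "};"],
  [.lit "template <", .f .typenames, .lit ">"],
  [.lit "struct TypeListMember", .f .n, .lit " : private Storage", .f .n, .f .templates],
  [.lit "{"],
  [.lit "typedef Storage", .f .n, .f .templates, .lit " BaseClass;"],
  [.lit "TypeListMember", .f .n, .lit "(", .f .params, .lit ") : BaseClass(", .f .params_names, .lit ") {}"],
  [.lit "template <typename T>"],
  [.lit "T& operator[](Value<T>& v)"],
  [.lit "{"],
  [.lit "return v.get();"],
  [.lit "}"],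
  [.lit "template <typename ReturnType, typename Caller, typename List>"],
  [.lit "ReturnType operator()(TypeTraits<ReturnType>, Caller& caller, List& list)"],
  [.lit "{"],
  [.lit "return (list[BaseClass::_t1].*caller)(", .f .list_params_next, .lit ");"],
  [.lit "}"],
  [.lit "};"]]

-- A's kwargs dict (fixed string keys → the record below; 'n' is formatted by str())
structure Kw where
  n : String
  typenames : String
  templates : String
  params : String
  params_names : String
  list_params : String
  list_params_next : String

-- '%d' on these nonnegative ints is str(); ', '.join = Str.join
def mkKwargs (i : Int) : Kw :=
  { n := PySem.Int.toStr i
  , typenames := PySem.Str.join ", "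
      ((PySem.List.pyRange 1 (i + 1) 1).map (fun j => "typename P" ++ PySem.Int.toStr j))
  , templates := if i ≠ 0 then
      "<" ++ PySem.Str.join ", "
        ((PySem.List.pyRange 1 (i + 1) 1).map (fun j => "P" ++ PySem.Int.toStr j)) ++ ">"
      else ""
  , params := PySem.Str.join ", "
      ((PySem.List.pyRange 1 (i + 1) 1).map (fun j => "P" ++ PySem.Int.toStr j ++ " p" ++ PySem.Int.toStr j))
  , params_names := PySem.Str.join ", "
      ((PySem.List.pyRange 1 (i + 1) 1).map (fun j => "p" ++ PySem.Int.toStr j))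
  , list_params := PySem.Str.join ",\n"
      ((PySem.List.pyRange 1 (i + 1) 1).map (fun j => "list[BaseClass::_t" ++ PySem.Int.toStr j ++ "]"))
  , list_params_next := PySem.Str.join ",\n"
      ((PySem.List.pyRange 2 (i + 1) 1).map (fun j => "list[BaseClass::_t" ++ PySem.Int.toStr j ++ "]")) }

def renderTok (kw : Kw) : Tok → String
  | .lit s => s
  | .f .n => kw.n
  | .f .typenames => kw.typenames
  | .f .templates => kw.templates
  | .f .params => kw.params
  | .f .params_names => kw.params_names
  | .f .list_params => kw.list_params
  | .f .list_params_next => kw.list_params_next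

-- line.format(**kwargs) on the parsed template
def formatLine (toks : List Tok) (kw : Kw) : String :=
  PySem.Str.join "" (toks.map (renderTok kw))

def IGNORE_0 : List Int := 0 :: PySem.List.pyRange 16 32 1

def make_typelist (n : Int) : List String :=
  if _h0 : n < 0 then []  -- Python raises OverflowError here; excluded by Pre_
  else
    let lines := if _h1 : n ≠ 0 then make_typelist (n - 1) else []
    let kw := mkKwargs n
    (PySem.List.enumerate TYPELIST).foldl
      (fun acc p => if n ≠ 0 ∨ ¬ (p.1 ∈ IGNORE_0) then acc ++ [formatLine p.2 kw] else acc)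
      lines
termination_by n.toNat
decreasing_by omega

-- ===== PORT B =====
-- Source B's inner `block(name, ret)`: one 16-line struct body built by direct concatenation
def pvBlock (name si typenames templates params params_names ret : String) : List String :=
  [ "template <" ++ typenames ++ ">"
  , "struct " ++ name ++ si ++ " : private Storage" ++ si ++ templates
  , "{"
  , "typedef Storage" ++ si ++ templates ++ " BaseClass;"
  , name ++ si ++ "(" ++ params ++ ") : BaseClass(" ++ params_names ++ ") {}"
  , "template <typename T>"
  , "T& operator[](Value<T>& v)"
  , "{"
  , "return v.get();"
  , "}"
  , "template <typename ReturnType, typename Caller, typename List>"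
  , "ReturnType operator()(TypeTraits<ReturnType>, Caller& caller, List& list)"
  , "{"
  , ret
  , "}"
  , "};" ]

-- one iteration of Source B's loop body: the lines contributed by level i
def pvLevel (i : Int) : List String :=
  let si := PySem.Int.toStr i
  let typenames := PySem.Str.join ", "
    ((PySem.List.pyRange 1 (i + 1) 1).map (fun j => "typename P" ++ PySem.Int.toStr j))
  let templates := if i ≠ 0 then
      "<" ++ PySem.Str.join ", "
        ((PySem.List.pyRange 1 (i + 1) 1).map (fun j => "P" ++ PySem.Int.toStr j)) ++ ">"
    else ""
  let params := PySem.Str.join ", "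
    ((PySem.List.pyRange 1 (i + 1) 1).map (fun j => "P" ++ PySem.Int.toStr j ++ " p" ++ PySem.Int.toStr j))
  let params_names := PySem.Str.join ", "
    ((PySem.List.pyRange 1 (i + 1) 1).map (fun j => "p" ++ PySem.Int.toStr j))
  let lp := PySem.Str.join ",\n"
    ((PySem.List.pyRange 1 (i + 1) 1).map (fun j => "list[BaseClass::_t" ++ PySem.Int.toStr j ++ "]"))
  let lpn := PySem.Str.join ",\n"
    ((PySem.List.pyRange 2 (i + 1) 1).map (fun j => "list[BaseClass::_t" ++ PySem.Int.toStr j ++ "]"))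
  let tl := pvBlock "TypeList" si typenames templates params params_names
    ("return caller(" ++ lp ++ ");")
  if i = 0 then
    tl.drop 1  -- level 0 keeps only the first struct, minus its empty template header
  else
    tl ++ pvBlock "TypeListMember" si typenames templates params params_names
      ("return (list[BaseClass::_t1].*caller)(" ++ lpn ++ ");")

def make_typelist_alt (n : Int) : List String :=
  if n < 0 then []  -- Python raises OverflowError here; excluded by Pre_
  else
    (PySem.List.pyRange 0 (n + 1) 1).foldl (fun out i => out ++ pvLevel i) []

-- ===== PRECONDITION & SPEC =====
-- Pre_ excludes exactly n < 0, where both Pythons raise OverflowError.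
def Pre_make_typelist (n : Int) : Prop := 0 ≤ n
instance (n : Int) : Decidable (Pre_make_typelist n) := by unfold Pre_make_typelist; infer_instance
def pvWitness_make_typelist : Int := 3
def Spec_make_typelist (n : Int) (out : List String) : Prop := out = make_typelist_alt n
instance (n : Int) (out : List String) : Decidable (Spec_make_typelist n out) := by unfold Spec_make_typelist; infer_instance

-- ===== CLAIM =====
def Claim_equal_make_typelist : Prop := ∀ (n : Int), Dom_make_typelist n → Pre_make_typelist n → Spec_make_typelist n (make_typelist n)

-- ===== LEMMAS AND PROOFS =====
-- one level of A's output, after the IGNORE_0 filter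
def levelA (i : Int) : List String :=
  (if i = 0 then (TYPELIST.drop 1).take 15 else TYPELIST).map
    (fun l => formatLine l (mkKwargs i))

theorem ignore0_eq : IGNORE_0 = ([0, 16, 17, 18, 19, 20, 21, 22, 23, 24, 25, 26, 27, 28, 29, 30, 31] : List Int) := by
  decide

theorem foldl_enumerate_snd {α β : Type} (f : β → α → β) (xs : List α) : ∀ (s : Int) (init : β),
    (PySem.List.enumerate xs s).foldl (fun acc p => f acc p.2) init = xs.foldl f init := by
  induction xs with
  | nil => intro s init; simp [PySem.List.enumerate_nil]
  | cons x xs ih => intro s init; simp [PySem.List.enumerate_cons, List.foldl_cons, ih]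

theorem levelA_eq (i : Int) (init : List String) :
    (PySem.List.enumerate TYPELIST).foldl
      (fun acc p => if i ≠ 0 ∨ ¬ (p.1 ∈ IGNORE_0) then acc ++ [formatLine p.2 (mkKwargs i)] else acc)
      init = init ++ levelA i := by
  by_cases hi : i = 0
  · subst hi
    simp only [levelA]
    simp only [TYPELIST, PySem.List.enumerate_cons, PySem.List.enumerate_nil, ignore0_eq]
    norm_num [List.mem_cons]
  · simp only [levelA, ne_eq, hi, not_false_iff, true_or, if_true]
    rw [foldl_enumerate_snd (fun acc l => acc ++ [formatLine l (mkKwargs i)]),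
      PySem.List.foldl_append_singleton_eq_map]
    simp

-- each level of A renders to exactly B's directly-built block(s)
theorem level_eq (i : Int) : levelA i = pvLevel i := by
  by_cases hi : i = 0
  · subst hi; decide
  · simp [levelA, pvLevel, hi, TYPELIST, formatLine, renderTok, mkKwargs, pvBlock,
      PySem.Str.join, PySem.Chars.join_cons_cons, PySem.Chars.join_singleton,
      String.append_assoc, String.ext_iff]

theorem A_zero : make_typelist 0 = pvLevel 0 := by
  rw [make_typelist]
  simp only [dif_neg (by omega : ¬ (0:Int) < 0), dif_neg (show ¬((0:Int) ≠ 0) by simp)]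
  rw [levelA_eq, level_eq]
  simp

theorem A_succ (n : Int) (h0 : 0 ≤ n) : make_typelist (n + 1) = make_typelist n ++ pvLevel (n + 1) := by
  rw [make_typelist]
  have h1 : ¬ (n + 1 < 0) := by omega
  have h2 : (n + 1 : Int) ≠ 0 := by omega
  simp only [dif_neg h1, dif_pos h2, add_sub_cancel_right]
  rw [levelA_eq, level_eq]

theorem B_zero : make_typelist_alt 0 = pvLevel 0 := by
  have hr : PySem.List.pyRange 0 (0 + 1) 1 = [0] := by decide
  rw [make_typelist_alt, if_neg (by omega : ¬ (0:Int) < 0), hr]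
  simp

theorem B_succ (n : Int) (h0 : 0 ≤ n) :
    make_typelist_alt (n + 1) = make_typelist_alt n ++ pvLevel (n + 1) := by
  rw [make_typelist_alt, make_typelist_alt,
    if_neg (by omega : ¬ n + 1 < 0), if_neg (by omega : ¬ n < 0),
    PySem.List.pyRange_one_succ_right (by omega : (0:Int) ≤ n + 1), List.foldl_append]
  simp

theorem main_nat (m : Nat) : make_typelist (m : Int) = make_typelist_alt (m : Int) := by
  induction m with
  | zero => simpa using A_zero.trans B_zero.symm
  | succ k ih =>
    have hc : ((k + 1 : Nat) : Int) = (k : Int) + 1 := by push_cast; ring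
    rw [hc, A_succ _ (Int.natCast_nonneg k), B_succ _ (Int.natCast_nonneg k), ih]

-- ===== VERDICT =====
theorem make_typelist_spec : Claim_equal_make_typelist := by
  intro n _ hpre
  unfold Spec_make_typelist
  have hn : n = ((n.toNat : Nat) : Int) := by
    have : (0:Int) ≤ n := hpre
    omega
  rw [hn]
  exact main_nat n.toNat
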